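-- pv_equiv track=rewrite | github.com/tfn-pt/prisma-pt | src/scrapers/netempregos_scraper.py | merge_timestamps_by_year
-- ===== SOURCE A (Python) =====
-- from collections import defaultdict
--
-- def merge_timestamps_by_year(
--     seed_results: list[tuple[str, list[str]]],
--     year_start: int,
--     year_end: int,
--     L,
-- ) -> dict[int, list[tuple[str, str]]]:
--     """
--     Recebe lista de (base_url, [timestamps]) por seed.
--     Devolve {year: [(ts, base_url), ...]} sem duplicados de data, ordenados cronologicamente.
--     Prioridade: seed anterior na lista vence em colisões de data.
--     O sampling de MIN_GAP_DAYS é feito dinamicamente em process_year (só avança após sucesso).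
--     """
--     # {year: {date_8: (ts, base_url)}}  — prioridade por ordem de seed
--     by_year_date: dict[int, dict[str, tuple[str, str]]] = defaultdict(dict)
--
--     for base_url, timestamps in seed_results:
--         for ts in timestamps:
--             y = year_of(ts)
--             if not (year_start <= y <= year_end):
--                 continue
--             date8 = ts[:8]
--             # Mantém apenas a lógica de prioridade de seeds para o mesmo dia
--             if date8 not in by_year_date[y]:
--                 by_year_date[y][date8] = (ts, base_url)
--
--     result: dict[int, list[tuple[str, str]]] = {}
--     for y in sorted(by_year_date):
--         # Devolve todos os pares cronologicamente, SEM SAMPLING PRÉVIO.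
--         # O sampling dinâmico (14 dias só em caso de sucesso) é feito em process_year.
--         all_pairs = sorted(by_year_date[y].values(), key=lambda p: p[0])
--         result[y] = all_pairs
--
--     return result
--
-- def year_of(ts: str) -> int:
--     return int(ts[:4]) if len(ts) >= 4 else 0
-- ===== SOURCE B (Python) =====
-- def merge_timestamps_by_year(seed_results, year_start, year_end, L):
--     # flatten -> one global sort -> adjacent-group dedup (first (seed,ts) occurrence
--     # per (year, date8) wins), years come out in sorted order automatically
--     flat = []
--     for si, (base_url, timestamps) in enumerate(seed_results):
--         for ti, ts in enumerate(timestamps):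
--             y = int(ts[:4]) if len(ts) >= 4 else 0
--             if year_start <= y <= year_end:
--                 flat.append((y, ts[:8], si, ti, ts, base_url))
--     flat.sort()
--     result = {}
--     prev = None
--     for y, d8, si, ti, ts, url in flat:
--         if (y, d8) != prev:
--             prev = (y, d8)
--             result.setdefault(y, []).append((ts, url))
--     return result
-- ===== Notes on version B (the rewrite author's own statement) =====
-- stated objective: alternative
-- what changed: Replaced the nested defaultdict-of-dicts dedup plus a separate sort per year by flatten-with-indices, one global sort, and a single adjacent-group pass that both dedups (first seed/timestamp occurrence per (year, date8) wins) and emits years and per-year pairs already in order.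
import Mathlib
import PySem

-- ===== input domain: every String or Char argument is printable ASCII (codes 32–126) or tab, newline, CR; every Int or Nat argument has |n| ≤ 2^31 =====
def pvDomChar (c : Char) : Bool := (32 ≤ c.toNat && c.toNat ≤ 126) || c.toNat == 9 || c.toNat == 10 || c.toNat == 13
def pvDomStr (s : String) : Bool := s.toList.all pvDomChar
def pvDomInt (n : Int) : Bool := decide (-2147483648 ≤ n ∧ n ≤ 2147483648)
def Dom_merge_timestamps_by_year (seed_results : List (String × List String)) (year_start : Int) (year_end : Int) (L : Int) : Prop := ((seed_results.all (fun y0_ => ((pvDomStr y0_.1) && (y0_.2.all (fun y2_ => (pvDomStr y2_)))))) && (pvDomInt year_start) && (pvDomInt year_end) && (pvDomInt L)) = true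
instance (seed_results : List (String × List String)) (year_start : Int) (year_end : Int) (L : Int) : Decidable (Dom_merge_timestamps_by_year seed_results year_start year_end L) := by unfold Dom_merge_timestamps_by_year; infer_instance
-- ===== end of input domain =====

-- B replaces A's nested defaultdict dedup + per-year sorts by flatten-with-indices, one
-- global sort, and a single adjacent-group pass (alternative algorithm, return value only).

-- ===== PORT A =====

-- helper `year_of`; the `.getD 0` is unreachable under Pre_ (int(ts[:4]) raises ↔ ofStr? = none)
def pv_year_of (ts : String) : Int :=
  if 4 ≤ PySem.Str.len ts then (PySem.Int.ofStr? (PySem.Str.slice ts none (some 4))).getD 0 else 0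

-- body of A's double loop: one timestamp `ts` of seed `base_url` into {year: {date8: (ts, base_url)}}
def pvA_add (year_start year_end : Int) (base_url : String)
    (d : PySem.Dict Int (PySem.Dict String (String × String))) (ts : String) :
    PySem.Dict Int (PySem.Dict String (String × String)) :=
  let y := pv_year_of ts
  if year_start ≤ y ∧ y ≤ year_end then
    let date8 := PySem.Str.slice ts none (some 8)
    let inner := (d.get? y).getD PySem.Dict.empty   -- defaultdict read by_year_date[y]
    let d1 := d.insert y inner                      -- defaultdict access materializes the key
    if inner.contains date8 then d1
    else d1.insert y (inner.insert date8 (ts, base_url))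
  else d

def merge_timestamps_by_year (seed_results : List (String × List String)) (year_start : Int) (year_end : Int) (L : Int) : List (Int × List (String × String)) :=
  let by_year_date := seed_results.foldl (fun d p => p.2.foldl (pvA_add year_start year_end p.1) d) PySem.Dict.empty
  -- `for y in sorted(by_year_date)`; `by_year_date[y]` never defaults: y is one of the keys
  (PySem.List.sorted by_year_date.keys (fun y => y)).foldl
    (fun res y =>
      let all_pairs := PySem.List.sorted ((by_year_date.get? y).getD PySem.Dict.empty).values (fun p => p.1)
      res ++ [(y, all_pairs)]) []

-- ===== PORT B =====

-- Python's tuple comparison on the 6-tuples of Source B's `flat` = nested lexicographic order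
def pvKey6 (r : Int × String × Int × Int × String × String) :
    Lex (Int × Lex (String × Lex (Int × Lex (Int × Lex (String × String))))) :=
  toLex (r.1, toLex (r.2.1, toLex (r.2.2.1, toLex (r.2.2.2.1, toLex (r.2.2.2.2.1, r.2.2.2.2.2)))))

-- body of Source B's grouping loop; state = (prev, result)
def pvB_gstep (st : Option (Int × String) × PySem.Dict Int (List (String × String)))
    (r : Int × String × Int × Int × String × String) :
    Option (Int × String) × PySem.Dict Int (List (String × String)) :=
  if st.1 = some (r.1, r.2.1) then st
  else (some (r.1, r.2.1), st.2.modify r.1 [] (fun l => l ++ [(r.2.2.2.2.1, r.2.2.2.2.2)]))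

def merge_timestamps_by_year_alt (seed_results : List (String × List String)) (year_start : Int) (year_end : Int) (L : Int) : List (Int × List (String × String)) :=
  let flat : List (Int × String × Int × Int × String × String) :=
    (PySem.List.enumerate seed_results).foldl (fun acc p =>
      (PySem.List.enumerate p.2.2).foldl (fun acc q =>
        let y := if 4 ≤ PySem.Str.len q.2 then (PySem.Int.ofStr? (PySem.Str.slice q.2 none (some 4))).getD 0 else 0
        if year_start ≤ y ∧ y ≤ year_end then
          acc ++ [(y, PySem.Str.slice q.2 none (some 8), p.1, q.1, q.2, p.2.1)]
        else acc) acc) []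
  let flatS := PySem.List.sorted flat pvKey6   -- flat.sort()
  ((flatS.foldl pvB_gstep (none, PySem.Dict.empty)).2).items

-- ===== PRECONDITION & SPEC =====

-- Pre_ excludes exactly the inputs where A raises: a timestamp of length ≥ 4 whose first four
-- characters do not parse as a Python int makes `int(ts[:4])` raise ValueError (B raises there too).
def Pre_merge_timestamps_by_year (seed_results : List (String × List String)) (year_start : Int) (year_end : Int) (L : Int) : Prop :=
  ∀ p ∈ seed_results, ∀ ts ∈ p.2, 4 ≤ PySem.Str.len ts →
    (PySem.Int.ofStr? (PySem.Str.slice ts none (some 4))).isSome = true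
instance (seed_results : List (String × List String)) (year_start : Int) (year_end : Int) (L : Int) : Decidable (Pre_merge_timestamps_by_year seed_results year_start year_end L) := by
  unfold Pre_merge_timestamps_by_year; infer_instance

def pvWitness_merge_timestamps_by_year : (List (String × List String)) × Int × Int × Int :=
  ([("u", ["20200101", "20200101120000", "2021"]), ("v", ["20200101", "1999"])], 1990, 2030, 0)

def Spec_merge_timestamps_by_year (seed_results : List (String × List String)) (year_start : Int) (year_end : Int) (L : Int) (out : List (Int × List (String × String))) : Prop := out = merge_timestamps_by_year_alt seed_results year_start year_end L
instance (seed_results : List (String × List String)) (year_start : Int) (year_end : Int) (L : Int) (out : List (Int × List (String × String))) : Decidable (Spec_merge_timestamps_by_year seed_results year_start year_end L out) := by unfold Spec_merge_timestamps_by_year; infer_instance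

-- ===== CLAIM (what is proved, stated in full; the proofs are below) =====
def Claim_equal_merge_timestamps_by_year : Prop := ∀ (seed_results : List (String × List String)) (year_start : Int) (year_end : Int) (L : Int), Dom_merge_timestamps_by_year seed_results year_start year_end L → Pre_merge_timestamps_by_year seed_results year_start year_end L → Spec_merge_timestamps_by_year seed_results year_start year_end L (merge_timestamps_by_year seed_results year_start year_end L)

-- ===== LEMMAS AND PROOFS =====

-- ---------- proof-side definitions ----------

-- (ts, base_url) pairs / the 6-tuples of Source B's `flat`
abbrev pvPair := String × String
abbrev pvItem := Int × String × Int × Int × String × String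
abbrev pvK2T := Lex (Int × String)

def pvVal (r : pvItem) : pvPair := (r.2.2.2.2.1, r.2.2.2.2.2)
def pvYOf (p : pvPair) : Int := pv_year_of p.1
def pvDOf (p : pvPair) : String := PySem.Str.slice p.1 none (some 8)
def pvKOf (p : pvPair) : pvK2T := toLex (pvYOf p, pvDOf p)
def pvK2 (r : pvItem) : pvK2T := toLex (r.1, r.2.1)
def pvIdx (r : pvItem) : Lex (Int × Int) := toLex (r.2.2.1, r.2.2.2.1)

-- the in-range (ts, url) stream, in traversal order
def pvQ (sr : List (String × List String)) (ys ye : Int) : List pvPair :=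
  (sr.flatMap (fun p => p.2.map (fun ts => (ts, p.1)))).filter
    (fun q => decide (ys ≤ pvYOf q ∧ pvYOf q ≤ ye))

def pvMkItem (si : Int) (u : String) (ti : Int) (ts : String) : pvItem :=
  (pv_year_of ts, PySem.Str.slice ts none (some 8), si, ti, ts, u)

-- Source B's `flat`, as flatMap/filter
def pvF (sr : List (String × List String)) (ys ye : Int) : List pvItem :=
  ((PySem.List.enumerate sr).flatMap
      (fun p => (PySem.List.enumerate p.2.2).map (fun q => pvMkItem p.1 p.2.1 q.1 q.2))).filter
    (fun r => decide (ys ≤ r.1 ∧ r.1 ≤ ye))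

-- A's loop body without the range guard
def pvStepA (d : PySem.Dict Int (PySem.Dict String pvPair)) (q : pvPair) :
    PySem.Dict Int (PySem.Dict String pvPair) :=
  let y := pvYOf q
  let inner := (d.get? y).getD PySem.Dict.empty
  let d1 := d.insert y inner
  if inner.contains (pvDOf q) then d1 else d1.insert y (inner.insert (pvDOf q) q)

-- keep the first element of each key class, in order (generic first-occurrence dedup)
def pvKeep {α κ : Type} [DecidableEq κ] (key : α → κ) (l : List α) : List α :=
  l.foldl (fun acc x => if ∃ w ∈ acc, key w = key x then acc else acc ++ [x]) []

abbrev pvW (Q : List pvPair) : List pvPair := pvKeep pvKOf Q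
def pvAList (Q : List pvPair) (yy : Int) : List pvPair :=
  (pvW Q).filter (fun p => decide (pvYOf p = yy))
def pvInner (Q : List pvPair) (yy : Int) : PySem.Dict String pvPair :=
  PySem.Dict.mk ((pvAList Q yy).map (fun p => (pvDOf p, p)))
abbrev pvYears (Q : List pvPair) : List Int := PySem.List.dedup (Q.map pvYOf)

-- adjacent-group dedup, mirroring Source B's `prev` loop
def pvAdj : Option (Int × String) → List pvItem → List pvItem
  | _, [] => []
  | prev, r :: rs =>
      if prev = some (r.1, r.2.1) then pvAdj prev rs else r :: pvAdj (some (r.1, r.2.1)) rs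

-- ---------- generic helpers ----------

theorem pv_eq_of_nodup_fst {α β : Type} {l : List (α × β)} (h : (l.map Prod.fst).Nodup)
    {a b : α × β} (ha : a ∈ l) (hb : b ∈ l) (hab : a.1 = b.1) : a = b := by
  induction l with
  | nil => cases ha
  | cons x xs ih =>
    simp only [List.map_cons, List.nodup_cons] at h
    rcases List.mem_cons.1 ha with rfl | ha' <;> rcases List.mem_cons.1 hb with rfl | hb'
    · rfl
    · exact absurd (show a.1 ∈ xs.map Prod.fst by rw [hab]; exact List.mem_map_of_mem hb') (by simpa using h.1)
    · exact absurd (show b.1 ∈ xs.map Prod.fst by rw [← hab]; exact List.mem_map_of_mem ha') (by simpa using h.1)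
    · exact ih h.2 ha' hb'

theorem pv_items_insert_self {κ ν : Type} [BEq κ] [LawfulBEq κ]
    (d : PySem.Dict κ ν) {k : κ} {v : ν} (hmem : (k, v) ∈ d.items) (hnd : d.keys.Nodup) :
    (d.insert k v).items = d.items := by
  have hc : d.contains k = true := by
    have : k ∈ d.keys := by
      simpa [PySem.Dict.keys] using List.mem_map_of_mem (f := Prod.fst) hmem
    exact (PySem.Dict.contains_iff_mem_keys _ _).2 this
  rw [PySem.Dict.items_insert_of_contains d v hc]
  conv_rhs => rw [← List.map_id d.items]
  apply List.map_congr_left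
  intro p hp
  by_cases hpk : p.1 = k
  · have : p = (k, v) := pv_eq_of_nodup_fst hnd hp hmem (by simpa using hpk)
    simp [this]
  · simp [hpk]

theorem pv_keep_append {α κ : Type} [DecidableEq κ] (key : α → κ) (l : List α) (x : α) :
    pvKeep key (l ++ [x]) =
      if ∃ w ∈ pvKeep key l, key w = key x then pvKeep key l else pvKeep key l ++ [x] := by
  simp [pvKeep, List.foldl_append]

theorem pv_keep_subset {α κ : Type} [DecidableEq κ] (key : α → κ) (l : List α) :
    ∀ w ∈ pvKeep key l, w ∈ l := by
  induction l using List.reverseRecOn with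
  | nil => simp [pvKeep]
  | append_singleton xs x ih =>
    rw [pv_keep_append]
    split
    · intro w hw; exact List.mem_append_left _ (ih w hw)
    · intro w hw
      rcases List.mem_append.1 hw with h | h
      · exact List.mem_append_left _ (ih w h)
      · exact List.mem_append_right _ h

theorem pv_keep_exists_key {α κ : Type} [DecidableEq κ] (key : α → κ) (l : List α) (k : κ) :
    (∃ w ∈ pvKeep key l, key w = k) ↔ ∃ x ∈ l, key x = k := by
  constructor
  · rintro ⟨w, hw, rfl⟩
    exact ⟨w, pv_keep_subset _ _ _ hw, rfl⟩
  · intro hx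
    induction l using List.reverseRecOn with
    | nil => simp at hx
    | append_singleton xs t ih =>
      rw [pv_keep_append]
      obtain ⟨x, hxm, rfl⟩ := hx
      rcases List.mem_append.1 hxm with hmem | hmem
      · obtain ⟨w, hw, hk⟩ := ih ⟨x, hmem, rfl⟩
        split
        · exact ⟨w, hw, hk⟩
        · exact ⟨w, List.mem_append_left _ hw, hk⟩
      · obtain rfl : x = t := by simpa using hmem
        split
        · rename_i hex
          obtain ⟨w, hw, hk⟩ := hex
          exact ⟨w, hw, hk⟩
        · exact ⟨x, List.mem_append_right _ (by simp), rfl⟩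

theorem pv_keep_pairwise_ne {α κ : Type} [DecidableEq κ] (key : α → κ) (l : List α) :
    (pvKeep key l).Pairwise (fun a b => key a ≠ key b) := by
  induction l using List.reverseRecOn with
  | nil => simp [pvKeep]
  | append_singleton xs x ih =>
    rw [pv_keep_append]
    split
    · exact ih
    · rename_i hnex
      rw [List.pairwise_append]
      refine ⟨ih, by simp, ?_⟩
      intro a ha b hb
      obtain rfl : b = x := by simpa using hb
      exact fun hk => hnex ⟨a, ha, hk⟩

theorem pv_keep_head_filter {α κ : Type} [DecidableEq κ] (key : α → κ) (l : List α) (x : α) :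
    x ∈ pvKeep key l ↔ (l.filter (fun z => decide (key z = key x))).head? = some x := by
  induction l using List.reverseRecOn with
  | nil => simp [pvKeep]
  | append_singleton xs t ih =>
    rw [pv_keep_append, List.filter_append]
    by_cases hkx : key t = key x
    · simp only [List.filter_cons, List.filter_nil, hkx, decide_true, if_true]
      split
      · rename_i hex
        have hne : xs.filter (fun z => decide (key z = key x)) ≠ [] := by
          obtain ⟨w, hw, hk⟩ := (pv_keep_exists_key key xs (key x)).1 hex
          intro hnil
          have : w ∈ xs.filter (fun z => decide (key z = key x)) := by
            simp [List.mem_filter, hw, hk]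
          rw [hnil] at this; cases this
        rw [List.head?_append_of_ne_nil _ hne]
        exact ih
      · rename_i hnex
        have hnil : xs.filter (fun z => decide (key z = key x)) = [] := by
          rw [List.filter_eq_nil_iff]
          intro z hz hk
          have hkz : key z = key x := by simpa using hk
          exact hnex ((pv_keep_exists_key key xs (key x)).2 ⟨z, hz, hkz⟩)
        rw [hnil]
        simp only [List.nil_append, List.head?_cons]
        constructor
        · intro hmem
          rcases List.mem_append.1 hmem with h | h
          · exfalso
            have hxs := pv_keep_subset key xs x h
            have : x ∈ xs.filter (fun z => decide (key z = key x)) := by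
              simp [List.mem_filter, hxs]
            rw [hnil] at this; cases this
          · obtain rfl : x = t := by simpa using h
            rfl
        · intro h
          obtain rfl : t = x := by simpa using h
          exact List.mem_append_right _ (by simp)
    · have hft : List.filter (fun z => decide (key z = key x)) [t] = [] := by simp [hkx]
      rw [hft, List.append_nil]
      split
      · exact ih
      · rw [← ih]
        constructor
        · intro hmem
          rcases List.mem_append.1 hmem with h | h
          · exact h
          · obtain rfl : x = t := by simpa using h
            exact absurd rfl hkx
        · intro h
          exact List.mem_append_left _ h

theorem pv_ofList_sublist {α : Type} [BEq α] [LawfulBEq α] (l : List α) :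
    List.Sublist (PySem.Set.ofList l) l := by
  induction l using List.reverseRecOn with
  | nil => simp [PySem.Set.ofList, PySem.Set.empty]
  | append_singleton xs x ih =>
    rw [PySem.Set.ofList] at ih ⊢
    rw [List.foldl_append]
    simp only [List.foldl_cons, List.foldl_nil, PySem.Set.add]
    split
    · exact ih.trans (List.sublist_append_left _ _)
    · exact List.Sublist.append ih (List.Sublist.refl _)

theorem pv_dedup_append {α : Type} [BEq α] [LawfulBEq α] (l : List α) (x : α) :
    PySem.List.dedup (l ++ [x]) =
      if x ∈ PySem.List.dedup l then PySem.List.dedup l else PySem.List.dedup l ++ [x] := by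
  rw [PySem.List.dedup, PySem.List.dedup, PySem.Set.ofList, PySem.Set.ofList, List.foldl_append]
  simp only [List.foldl_cons, List.foldl_nil, PySem.Set.add]
  split <;> split <;> first | rfl | (rename_i h1 h2; exfalso)
  · exact h2 (by simpa using h1)
  · exact h1 (by simpa using h2)

theorem pv_take_lt_lex {n : Nat} {s t : List Char}
    (h : List.Lex (· < ·) (s.take n) (t.take n)) : List.Lex (· < ·) s t := by
  induction n generalizing s t with
  | zero => simp at h
  | succ m ih =>
    cases s with
    | nil =>
      cases t with
      | nil => simp at h
      | cons b t' => exact List.Lex.nil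
    | cons a s' =>
      cases t with
      | nil => simp at h
      | cons b t' =>
        simp only [List.take_succ_cons] at h
        cases h with
        | rel hab => exact List.Lex.rel hab
        | cons htail => exact List.Lex.cons (ih htail)

theorem pv_take_lt {n : Nat} {s t : List Char} (h : s.take n < t.take n) : s < t :=
  (List.lt_iff_lex_lt _ _).2 (pv_take_lt_lex ((List.lt_iff_lex_lt _ _).1 h))

-- date8-prefix order forces full-timestamp order (ASCII code-point lex, both sides)
theorem pv_dOf_lt {p q : pvPair} (h : pvDOf p < pvDOf q) : p.1 < q.1 := by
  rw [String.lt_iff_toList_lt] at *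
  have hs : (pvDOf p).toList = p.1.toList.take 8 := by
    simp [pvDOf, PySem.Str.toList_slice, PySem.List.slice_to]
  have ht : (pvDOf q).toList = q.1.toList.take 8 := by
    simp [pvDOf, PySem.Str.toList_slice, PySem.List.slice_to]
  rw [hs, ht] at h
  exact pv_take_lt h

-- ---------- A side ----------

theorem pvA_loop_eq (sr : List (String × List String)) (ys ye : Int)
    (d : PySem.Dict Int (PySem.Dict String pvPair)) :
    sr.foldl (fun d p => p.2.foldl (pvA_add ys ye p.1) d) d = (pvQ sr ys ye).foldl pvStepA d := by
  induction sr generalizing d with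
  | nil => simp [pvQ]
  | cons p sr ih =>
    rw [List.foldl_cons, ih]
    have h1 : pvQ (p :: sr) ys ye =
        (p.2.map (fun ts => (ts, p.1))).filter (fun q => decide (ys ≤ pvYOf q ∧ pvYOf q ≤ ye))
          ++ pvQ sr ys ye := by
      simp [pvQ]
    rw [h1, List.foldl_append]
    congr 1
    have h2 : p.2.foldl (pvA_add ys ye p.1) d =
        (p.2.map (fun ts => (ts, p.1))).foldl
          (fun d q => if ys ≤ pvYOf q ∧ pvYOf q ≤ ye then pvStepA d q else d) d := by
      rw [List.foldl_map]
      congr 1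
    rw [h2, PySem.List.foldl_ite_eq_foldl_filter]

theorem pvStepA_eq (d : PySem.Dict Int (PySem.Dict String pvPair)) (q : pvPair) :
    pvStepA d q =
      (if ((d.get? (pvYOf q)).getD PySem.Dict.empty).contains (pvDOf q)
       then d.insert (pvYOf q) ((d.get? (pvYOf q)).getD PySem.Dict.empty)
       else d.insert (pvYOf q)
         (((d.get? (pvYOf q)).getD PySem.Dict.empty).insert (pvDOf q) q)) := by
  simp only [pvStepA]
  split
  · rfl
  · rw [PySem.Dict.insert_insert_self]

theorem pv_inner_contains (Q : List pvPair) (yy : Int) (d0 : String) :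
    (pvInner Q yy).contains d0 = true ↔ ∃ w ∈ pvW Q, pvYOf w = yy ∧ pvDOf w = d0 := by
  rw [pvInner, PySem.Dict.contains_mk]
  rw [List.any_eq_true]
  constructor
  · rintro ⟨p, hp, he⟩
    rcases List.mem_map.1 hp with ⟨w, hw, rfl⟩
    rw [pvAList, List.mem_filter] at hw
    exact ⟨w, hw.1, by simpa using hw.2, by simpa using he⟩
  · rintro ⟨w, hw, hwy, hwd⟩
    refine ⟨(pvDOf w, w), List.mem_map_of_mem ?_, by simpa using hwd⟩
    rw [pvAList, List.mem_filter]
    exact ⟨hw, by simpa using hwy⟩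

theorem pvA_items (Q : List pvPair) :
    (Q.foldl pvStepA PySem.Dict.empty).items =
      (pvYears Q).map (fun yy => (yy, pvInner Q yy)) := by
  induction Q using List.reverseRecOn with
  | nil => rfl
  | append_singleton Q q ih =>
    rw [List.foldl_append, List.foldl_cons, List.foldl_nil]
    have hkeys : (Q.foldl pvStepA PySem.Dict.empty).keys = pvYears Q := by
      rw [PySem.Dict.keys, ih, List.map_map]
      show List.map id (pvYears Q) = pvYears Q
      exact List.map_id _
    have hnodupY : (pvYears Q).Nodup := by
      rw [pvYears, PySem.List.dedup]
      exact PySem.Set.nodup_ofList _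
    have hnodupK : (Q.foldl pvStepA PySem.Dict.empty).keys.Nodup := by rw [hkeys]; exact hnodupY
    have hYmem : ∀ yy : Int, yy ∈ pvYears Q ↔ ∃ p ∈ Q, pvYOf p = yy := by
      intro yy
      rw [show pvYears Q = PySem.List.dedup (List.map pvYOf Q) from rfl,
        PySem.List.mem_dedup, List.mem_map]
    have hget : ∀ yy ∈ pvYears Q,
        (Q.foldl pvStepA PySem.Dict.empty).get? yy = some (pvInner Q yy) := by
      intro yy hy
      rw [PySem.Dict.get?_eq_some_iff_mem_items _ _ _ hnodupK, ih]
      exact List.mem_map_of_mem hy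
    have hWyear : ∀ w ∈ pvW Q, pvYOf w ∈ pvYears Q := by
      intro w hw
      exact (hYmem _).2 ⟨w, pv_keep_subset _ _ _ hw, rfl⟩
    by_cases hy : pvYOf q ∈ pvYears Q
    · -- year already present
      have hinner := hget (pvYOf q) hy
      by_cases hd : ∃ w ∈ pvW Q, pvKOf w = pvKOf q
      · -- (year, date8) already present: nothing changes
        have hcont : (pvInner Q (pvYOf q)).contains (pvDOf q) = true := by
          rw [pv_inner_contains]
          obtain ⟨w, hw, hk⟩ := hd
          have h2 : (pvYOf w, pvDOf w) = (pvYOf q, pvDOf q) := by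
            rw [pvKOf, pvKOf] at hk
            simpa using hk
          exact ⟨w, hw, congrArg Prod.fst h2, congrArg Prod.snd h2⟩
        have hW' : pvW (Q ++ [q]) = pvW Q := by
          show pvKeep pvKOf (Q ++ [q]) = pvKeep pvKOf Q
          rw [pv_keep_append, if_pos hd]
        have hY' : pvYears (Q ++ [q]) = pvYears Q := by
          show PySem.List.dedup (List.map pvYOf (Q ++ [q])) = PySem.List.dedup (List.map pvYOf Q)
          rw [List.map_append]
          rw [show (List.map pvYOf [q]) = [pvYOf q] from rfl]
          rw [pv_dedup_append, if_pos hy]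
        rw [pvStepA_eq, hinner]
        simp only [Option.getD_some]
        rw [if_pos hcont]
        rw [pv_items_insert_self _ (by rw [ih]; exact List.mem_map_of_mem hy) hnodupK]
        rw [ih, hY']
        apply List.map_congr_left
        intro yy hyy
        have : pvInner (Q ++ [q]) yy = pvInner Q yy := by
          rw [pvInner, pvInner, pvAList, pvAList, hW']
        rw [this]
      · -- year present, new date8
        have hcont : (pvInner Q (pvYOf q)).contains (pvDOf q) = false := by
          rw [Bool.eq_false_iff]
          intro hc
          obtain ⟨w, hw, h1, h2⟩ := (pv_inner_contains _ _ _).1 hc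
          exact hd ⟨w, hw, by rw [pvKOf, pvKOf, h1, h2]⟩
        have hW' : pvW (Q ++ [q]) = pvW Q ++ [q] := by
          show pvKeep pvKOf (Q ++ [q]) = pvKeep pvKOf Q ++ [q]
          rw [pv_keep_append, if_neg hd]
        have hY' : pvYears (Q ++ [q]) = pvYears Q := by
          show PySem.List.dedup (List.map pvYOf (Q ++ [q])) = PySem.List.dedup (List.map pvYOf Q)
          rw [List.map_append]
          rw [show (List.map pvYOf [q]) = [pvYOf q] from rfl]
          rw [pv_dedup_append, if_pos hy]
        have hconty : (Q.foldl pvStepA PySem.Dict.empty).contains (pvYOf q) = true :=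
          (PySem.Dict.contains_iff_mem_keys _ _).2 (by rw [hkeys]; exact hy)
        rw [pvStepA_eq, hinner]
        simp only [Option.getD_some]
        rw [if_neg (by rw [hcont]; exact Bool.false_ne_true)]
        rw [PySem.Dict.items_insert_of_contains _ _ hconty, ih, hY', List.map_map]
        apply List.map_congr_left
        intro yy hyy
        simp only [Function.comp_apply]
        by_cases hyyq : yy = pvYOf q
        · rw [hyyq]
          rw [if_pos (by simp)]
          have hAL : pvAList (Q ++ [q]) (pvYOf q) = pvAList Q (pvYOf q) ++ [q] := by
            rw [pvAList, pvAList, hW', List.filter_append]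
            simp
          refine Prod.ext rfl ?_
          apply PySem.Dict.ext
          show ((pvInner Q (pvYOf q)).insert (pvDOf q) q).items
            = (pvInner (Q ++ [q]) (pvYOf q)).items
          rw [PySem.Dict.items_insert_of_not_contains _ _ hcont]
          rw [pvInner, pvInner, hAL, List.map_append]
          rfl
        · rw [if_neg (by simpa using hyyq)]
          have hqy : ¬ (pvYOf q = yy) := fun h => hyyq h.symm
          have : pvInner (Q ++ [q]) yy = pvInner Q yy := by
            rw [pvInner, pvInner, pvAList, pvAList, hW', List.filter_append]
            rw [show List.filter (fun p => decide (pvYOf p = yy)) [q] = [] from by simp [hqy]]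
            rw [List.append_nil]
          rw [this]
    · -- fresh year
      have hd : ¬ ∃ w ∈ pvW Q, pvKOf w = pvKOf q := by
        rintro ⟨w, hw, hk⟩
        apply hy
        have h1 : pvYOf w = pvYOf q := by
          rw [pvKOf, pvKOf] at hk
          have h2 : (pvYOf w, pvDOf w) = (pvYOf q, pvDOf q) := by simpa using hk
          exact congrArg Prod.fst h2
        rw [← h1]
        exact hWyear w hw
      have hW' : pvW (Q ++ [q]) = pvW Q ++ [q] := by
        show pvKeep pvKOf (Q ++ [q]) = pvKeep pvKOf Q ++ [q]
        rw [pv_keep_append, if_neg hd]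
      have hY' : pvYears (Q ++ [q]) = pvYears Q ++ [pvYOf q] := by
        show PySem.List.dedup (List.map pvYOf (Q ++ [q])) = PySem.List.dedup (List.map pvYOf Q) ++ [pvYOf q]
        rw [List.map_append]
        rw [show (List.map pvYOf [q]) = [pvYOf q] from rfl]
        rw [pv_dedup_append, if_neg hy]
      have hgn : (Q.foldl pvStepA PySem.Dict.empty).get? (pvYOf q) = none :=
        (PySem.Dict.get?_eq_none_iff_not_mem_keys _ _).2 (by rw [hkeys]; exact hy)
      have hcn : (Q.foldl pvStepA PySem.Dict.empty).contains (pvYOf q) = false := by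
        rw [Bool.eq_false_iff]
        intro hc
        exact hy (by rw [← hkeys]; exact (PySem.Dict.contains_iff_mem_keys _ _).1 hc)
      rw [pvStepA_eq, hgn]
      simp only [Option.getD_none]
      rw [if_neg (by rw [PySem.Dict.contains_empty]; exact Bool.false_ne_true)]
      rw [PySem.Dict.items_insert_of_not_contains _ _ hcn, ih, hY', List.map_append]
      congr 1
      · apply List.map_congr_left
        intro yy hyy
        have hyyq : ¬ (pvYOf q = yy) := fun h => hy (h ▸ hyy)
        have : pvInner (Q ++ [q]) yy = pvInner Q yy := by
          rw [pvInner, pvInner, pvAList, pvAList, hW', List.filter_append]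
          rw [show List.filter (fun p => decide (pvYOf p = yy)) [q] = [] from by simp [hyyq]]
          rw [List.append_nil]
        rw [this]
      · rw [show List.map (fun yy => (yy, pvInner (Q ++ [q]) yy)) [pvYOf q]
            = [(pvYOf q, pvInner (Q ++ [q]) (pvYOf q))] from rfl]
        have hAL : pvAList (Q ++ [q]) (pvYOf q) = [q] := by
          rw [pvAList, hW', List.filter_append]
          rw [show List.filter (fun p => decide (pvYOf p = pvYOf q)) (pvW Q) = [] from by
            rw [List.filter_eq_nil_iff]
            intro w hw hwq
            exact hy (by rw [← (by simpa using hwq : pvYOf w = pvYOf q)]; exact hWyear w hw)]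
          simp
        apply List.cons_eq_cons.2
        refine ⟨?_, rfl⟩
        apply Prod.ext
        · rfl
        · apply PySem.Dict.ext
          show (PySem.Dict.empty.insert (pvDOf q) q).items = (pvInner (Q ++ [q]) (pvYOf q)).items
          rw [PySem.Dict.items_insert_of_not_contains _ _ (PySem.Dict.contains_empty _)]
          rw [pvInner, hAL]
          rfl

-- ---------- B side ----------

theorem pvB_flat_eq (sr : List (String × List String)) (ys ye : Int)
    (acc : List pvItem) :
    (PySem.List.enumerate sr).foldl (fun acc p =>
      (PySem.List.enumerate p.2.2).foldl (fun acc q =>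
        let y := if 4 ≤ PySem.Str.len q.2 then (PySem.Int.ofStr? (PySem.Str.slice q.2 none (some 4))).getD 0 else 0
        if ys ≤ y ∧ y ≤ ye then
          acc ++ [(y, PySem.Str.slice q.2 none (some 8), p.1, q.1, q.2, p.2.1)]
        else acc) acc) acc = acc ++ pvF sr ys ye := by
  have gen : ∀ (l : List (Int × String × List String)) (acc : List pvItem),
      l.foldl (fun acc p =>
        (PySem.List.enumerate p.2.2).foldl (fun acc q =>
          let y := if 4 ≤ PySem.Str.len q.2 then (PySem.Int.ofStr? (PySem.Str.slice q.2 none (some 4))).getD 0 else 0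
          if ys ≤ y ∧ y ≤ ye then
            acc ++ [(y, PySem.Str.slice q.2 none (some 8), p.1, q.1, q.2, p.2.1)]
          else acc) acc) acc
      = acc ++ (l.flatMap (fun p => (PySem.List.enumerate p.2.2).map
            (fun q => pvMkItem p.1 p.2.1 q.1 q.2))).filter
          (fun r => decide (ys ≤ r.1 ∧ r.1 ≤ ye)) := by
    intro l
    induction l with
    | nil => simp
    | cons p l ihl =>
      intro acc
      rw [List.foldl_cons, ihl]
      have h2 : (PySem.List.enumerate p.2.2).foldl (fun acc q =>
          let y := if 4 ≤ PySem.Str.len q.2 then (PySem.Int.ofStr? (PySem.Str.slice q.2 none (some 4))).getD 0 else 0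
          if ys ≤ y ∧ y ≤ ye then
            acc ++ [(y, PySem.Str.slice q.2 none (some 8), p.1, q.1, q.2, p.2.1)]
          else acc) acc
          = acc ++ ((PySem.List.enumerate p.2.2).map (fun q => pvMkItem p.1 p.2.1 q.1 q.2)).filter
              (fun r => decide (ys ≤ r.1 ∧ r.1 ≤ ye)) := by
        have := PySem.List.foldl_append_ite
          (fun q : Int × String => ys ≤ pv_year_of q.2 ∧ pv_year_of q.2 ≤ ye)
          (fun q : Int × String => pvMkItem p.1 p.2.1 q.1 q.2)
          (PySem.List.enumerate p.2.2) acc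
        rw [show ((PySem.List.enumerate p.2.2).map (fun q => pvMkItem p.1 p.2.1 q.1 q.2)).filter
              (fun r => decide (ys ≤ r.1 ∧ r.1 ≤ ye))
            = ((PySem.List.enumerate p.2.2).filter
                (fun q => decide (ys ≤ pv_year_of q.2 ∧ pv_year_of q.2 ≤ ye))).map
                (fun q => pvMkItem p.1 p.2.1 q.1 q.2) from List.filter_map]
        exact this
      rw [h2, List.append_assoc]
      simp [List.filter_append]
  exact gen (PySem.List.enumerate sr) acc

theorem pvF_map_val (sr : List (String × List String)) (ys ye : Int) :
    (pvF sr ys ye).map pvVal = pvQ sr ys ye := by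
  have hcong : (pvF sr ys ye) =
      (((PySem.List.enumerate sr).flatMap (fun p => (PySem.List.enumerate p.2.2).map
          (fun q => pvMkItem p.1 p.2.1 q.1 q.2))).filter
        (fun r => decide (ys ≤ pvYOf (pvVal r) ∧ pvYOf (pvVal r) ≤ ye))) := by
    apply List.filter_congr
    intro r hr
    rcases List.mem_flatMap.1 hr with ⟨p, _, hq⟩
    rcases List.mem_map.1 hq with ⟨q, _, rfl⟩
    rfl
  rw [hcong]
  rw [show (((PySem.List.enumerate sr).flatMap (fun p => (PySem.List.enumerate p.2.2).map
          (fun q => pvMkItem p.1 p.2.1 q.1 q.2))).filter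
        (fun r => decide (ys ≤ pvYOf (pvVal r) ∧ pvYOf (pvVal r) ≤ ye))).map pvVal
      = (((PySem.List.enumerate sr).flatMap (fun p => (PySem.List.enumerate p.2.2).map
          (fun q => pvMkItem p.1 p.2.1 q.1 q.2))).map pvVal).filter
        (fun q => decide (ys ≤ pvYOf q ∧ pvYOf q ≤ ye)) from
      (List.filter_map (f := pvVal) (p := fun q => decide (ys ≤ pvYOf q ∧ pvYOf q ≤ ye))).symm]
  unfold pvQ
  congr 1
  rw [List.map_flatMap]
  have hinner : ∀ (xs : List String) (u : String),
      (PySem.List.enumerate xs 0).map (fun q => ((q.2 : String), u)) = xs.map (fun ts => (ts, u)) := by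
    intro xs u
    conv_rhs => rw [← PySem.List.map_snd_enumerate xs 0]
    rw [List.map_map]
    rfl
  have hbody : ∀ p : Int × String × List String,
      ((PySem.List.enumerate p.2.2).map (fun q => pvMkItem p.1 p.2.1 q.1 q.2)).map pvVal
        = p.2.2.map (fun ts => (ts, p.2.1)) := by
    intro p
    rw [List.map_map]
    exact hinner p.2.2 p.2.1
  have houter : (PySem.List.enumerate sr).flatMap
        (fun p => p.2.2.map (fun ts => (ts, p.2.1)))
      = sr.flatMap (fun w => w.2.map (fun ts => (ts, w.1))) := by
    conv_rhs => rw [← PySem.List.map_snd_enumerate sr 0]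
    rw [List.flatMap_map]
  rw [← houter]
  simp only [hbody]

theorem pvF_fields (sr : List (String × List String)) (ys ye : Int) :
    ∀ r ∈ pvF sr ys ye, r.1 = pvYOf (pvVal r) ∧ r.2.1 = pvDOf (pvVal r) := by
  intro r hr
  rw [pvF, List.mem_filter] at hr
  rcases List.mem_flatMap.1 hr.1 with ⟨p, _, hq⟩
  rcases List.mem_map.1 hq with ⟨q, _, rfl⟩
  exact ⟨rfl, rfl⟩

theorem pvF_idx (sr : List (String × List String)) (ys ye : Int) :
    (pvF sr ys ye).Pairwise (fun a b => pvIdx a < pvIdx b) := by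
  unfold pvF
  apply List.Pairwise.filter
  rw [List.pairwise_flatMap]
  constructor
  · intro p hp
    rw [List.pairwise_map]
    refine (PySem.List.pairwise_lt_enumerate p.2.2 0).imp ?_
    intro a b hab
    refine Prod.Lex.lt_iff.2 ?_
    right
    exact ⟨rfl, hab⟩
  · refine (PySem.List.pairwise_lt_enumerate sr 0).imp ?_
    intro p p' hpp x hx y hy
    rcases List.mem_map.1 hx with ⟨q, _, rfl⟩
    rcases List.mem_map.1 hy with ⟨q', _, rfl⟩
    refine Prod.Lex.lt_iff.2 ?_
    left
    exact hpp

-- the grouping loop = modify-append fold over the adjacent dedup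
theorem pvB_group_eq (S : List pvItem) (prev : Option (Int × String))
    (d : PySem.Dict Int (List pvPair)) :
    (S.foldl pvB_gstep (prev, d)).2 =
      (pvAdj prev S).foldl (fun d r => d.modify r.1 [] (fun l => l ++ [pvVal r])) d := by
  induction S generalizing prev d with
  | nil => rfl
  | cons r rs ih =>
    rw [List.foldl_cons]
    by_cases hp : prev = some (r.1, r.2.1)
    · rw [show pvB_gstep (prev, d) r = (prev, d) from by simp [pvB_gstep, hp]]
      rw [show pvAdj prev (r :: rs) = pvAdj prev rs from by simp [pvAdj, hp]]
      exact ih prev d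
    · rw [show pvB_gstep (prev, d) r
          = (some (r.1, r.2.1), d.modify r.1 [] (fun l => l ++ [pvVal r])) from by
        simp [pvB_gstep, hp, pvVal]]
      rw [show pvAdj prev (r :: rs) = r :: pvAdj (some (r.1, r.2.1)) rs from by
        simp [pvAdj, hp]]
      rw [List.foldl_cons]
      exact ih _ _

theorem pv_adj_aux (S : List pvItem) : ∀ (acc : List pvItem) (c : Int × String),
    (∃ w ∈ acc, pvK2 w = toLex c) →
    (∀ w ∈ acc, pvK2 w ≤ toLex c) →
    (∀ r ∈ S, toLex c ≤ pvK2 r) →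
    S.Pairwise (fun a b => pvK2 a ≤ pvK2 b) →
    S.foldl (fun acc x => if ∃ w ∈ acc, pvK2 w = pvK2 x then acc else acc ++ [x]) acc
      = acc ++ pvAdj (some c) S := by
  induction S with
  | nil => intro acc c _ _ _ _; simp [pvAdj]
  | cons r rs ih =>
    intro acc c hin hmax hlo hpw
    rw [List.foldl_cons]
    by_cases hk : pvK2 r = toLex c
    · have hc : c = (r.1, r.2.1) := by
        have : toLex (r.1, r.2.1) = toLex c := hk
        simpa using this.symm
      have hcond : ∃ w ∈ acc, pvK2 w = pvK2 r := by
        obtain ⟨w, hw, he⟩ := hin; exact ⟨w, hw, he.trans hk.symm⟩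
      rw [if_pos hcond]
      rw [show pvAdj (some c) (r :: rs) = pvAdj (some c) rs from by
        simp only [pvAdj]; rw [if_pos (by rw [hc])]]
      exact ih acc c hin hmax (fun x hx => hlo x (List.mem_cons_of_mem _ hx)) hpw.of_cons
    · have hlt : toLex c < pvK2 r :=
        lt_of_le_of_ne (hlo r (List.mem_cons_self)) (fun he => hk he.symm)
      have hcond : ¬ ∃ w ∈ acc, pvK2 w = pvK2 r := by
        rintro ⟨w, hw, he⟩
        exact absurd (he ▸ hmax w hw) (not_le.2 hlt)
      rw [if_neg hcond]
      rw [show pvAdj (some c) (r :: rs) = r :: pvAdj (some (r.1, r.2.1)) rs from by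
        simp only [pvAdj]; rw [if_neg (by
          intro he
          apply hk
          obtain rfl : c = (r.1, r.2.1) := by simpa using he
          rfl)]]
      have hres := ih (acc ++ [r]) (r.1, r.2.1) ⟨r, by simp, rfl⟩
        (by
          intro w hw
          rcases List.mem_append.1 hw with h | h
          · exact le_trans (hmax w h) (le_of_lt hlt)
          · obtain rfl : w = r := by simpa using h
            exact le_refl _)
        (fun x hx => List.rel_of_pairwise_cons hpw hx)
        hpw.of_cons
      rw [hres, List.append_assoc]
      rfl

-- on a key2-sorted run, adjacent dedup = global first-occurrence dedup
theorem pv_adj_eq_keep (S : List pvItem) (h : S.Pairwise (fun a b => pvK2 a ≤ pvK2 b)) :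
    pvAdj none S = pvKeep pvK2 S := by
  cases S with
  | nil => rfl
  | cons r rs =>
    rw [pvKeep, List.foldl_cons, if_neg (by simp)]
    rw [show pvAdj none (r :: rs) = r :: pvAdj (some (r.1, r.2.1)) rs from by
      simp [pvAdj]]
    have hres := pv_adj_aux rs [r] (r.1, r.2.1) ⟨r, by simp, rfl⟩
      (by
        intro w hw
        obtain rfl : w = r := by simpa using hw
        exact le_refl _)
      (fun x hx => List.rel_of_pairwise_cons h hx) h.of_cons
    rw [show ([] : List pvItem) ++ [r] = [r] from rfl, hres]
    rfl

theorem pv_adj_lb (S : List pvItem) : ∀ (c : Int × String),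
    (∀ r ∈ S, toLex c ≤ pvK2 r) → S.Pairwise (fun a b => pvK2 a ≤ pvK2 b) →
    ∀ x ∈ pvAdj (some c) S, toLex c < pvK2 x := by
  induction S with
  | nil => simp [pvAdj]
  | cons r rs ih =>
    intro c hlo hpw x hx
    simp only [pvAdj] at hx
    split at hx
    · rename_i hc
      obtain rfl : c = (r.1, r.2.1) := by simpa using hc
      exact ih (r.1, r.2.1) (fun z hz => List.rel_of_pairwise_cons hpw hz) hpw.of_cons x hx
    · rename_i hc
      rcases List.mem_cons.1 hx with rfl | hx'
      · refine lt_of_le_of_ne (hlo x (List.mem_cons_self)) ?_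
        intro he
        apply hc
        have : toLex c = toLex (x.1, x.2.1) := he
        simp only [Option.some_inj]
        simpa using this
      · have h2 := ih (r.1, r.2.1) (fun z hz => List.rel_of_pairwise_cons hpw hz) hpw.of_cons x hx'
        exact lt_of_le_of_lt (hlo r List.mem_cons_self) h2

theorem pv_adj_pairwise_some (S : List pvItem) : ∀ (c : Int × String),
    (∀ r ∈ S, toLex c ≤ pvK2 r) → S.Pairwise (fun a b => pvK2 a ≤ pvK2 b) →
    (pvAdj (some c) S).Pairwise (fun a b => pvK2 a < pvK2 b) := by
  induction S with
  | nil => intro c _ _; exact List.Pairwise.nil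
  | cons r rs ih =>
    intro c hlo hpw
    simp only [pvAdj]
    split
    · rename_i hc
      obtain rfl : c = (r.1, r.2.1) := by simpa using hc
      exact ih (r.1, r.2.1) (fun z hz => List.rel_of_pairwise_cons hpw hz) hpw.of_cons
    · refine List.Pairwise.cons ?_ ?_
      · intro x hx
        exact pv_adj_lb rs (r.1, r.2.1) (fun z hz => List.rel_of_pairwise_cons hpw hz) hpw.of_cons x hx
      · exact ih (r.1, r.2.1) (fun z hz => List.rel_of_pairwise_cons hpw hz) hpw.of_cons

theorem pv_adj_pairwise (S : List pvItem) (h : S.Pairwise (fun a b => pvK2 a ≤ pvK2 b)) :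
    (pvAdj none S).Pairwise (fun a b => pvK2 a < pvK2 b) := by
  cases S with
  | nil => exact List.Pairwise.nil
  | cons r rs =>
    rw [show pvAdj none (r :: rs) = r :: pvAdj (some (r.1, r.2.1)) rs from by simp [pvAdj]]
    refine List.Pairwise.cons ?_ ?_
    · intro x hx
      exact pv_adj_lb rs (r.1, r.2.1) (fun z hz => List.rel_of_pairwise_cons h hz) h.of_cons x hx
    · exact pv_adj_pairwise_some rs (r.1, r.2.1) (fun z hz => List.rel_of_pairwise_cons h hz) h.of_cons

-- small Lex-component helpers
theorem pvK2_eq_iff {a b : pvItem} : pvK2 a = pvK2 b ↔ a.1 = b.1 ∧ a.2.1 = b.2.1 := by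
  rw [pvK2, pvK2]
  constructor
  · intro h
    have h2 : (a.1, a.2.1) = (b.1, b.2.1) := by simpa using h
    rw [Prod.mk.injEq] at h2
    exact h2
  · rintro ⟨h1, h2⟩
    rw [h1, h2]

theorem pvK2_lt_iff {a b : pvItem} :
    pvK2 a < pvK2 b ↔ a.1 < b.1 ∨ (a.1 = b.1 ∧ a.2.1 < b.2.1) := by
  rw [pvK2, pvK2, Prod.Lex.lt_iff]
  simp

theorem pvK2_le_iff {a b : pvItem} :
    pvK2 a ≤ pvK2 b ↔ a.1 < b.1 ∨ (a.1 = b.1 ∧ a.2.1 ≤ b.2.1) := by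
  rw [pvK2, pvK2, Prod.Lex.le_iff]
  simp

theorem pvIdx_lt_iff {a b : pvItem} :
    pvIdx a < pvIdx b ↔ a.2.2.1 < b.2.2.1 ∨ (a.2.2.1 = b.2.2.1 ∧ a.2.2.2.1 < b.2.2.2.1) := by
  rw [pvIdx, pvIdx, Prod.Lex.lt_iff]
  simp

theorem pvKey6_lt_iff {a b : pvItem} :
    pvKey6 a < pvKey6 b ↔ a.1 < b.1 ∨ (a.1 = b.1 ∧ (a.2.1 < b.2.1 ∨ (a.2.1 = b.2.1 ∧
      (a.2.2.1 < b.2.2.1 ∨ (a.2.2.1 = b.2.2.1 ∧ (a.2.2.2.1 < b.2.2.2.1 ∨ (a.2.2.2.1 = b.2.2.2.1 ∧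
        (a.2.2.2.2.1 < b.2.2.2.2.1 ∨ (a.2.2.2.2.1 = b.2.2.2.2.1 ∧ a.2.2.2.2.2 < b.2.2.2.2.2))))))))) := by
  rw [pvKey6, pvKey6, Prod.Lex.lt_iff]
  simp [Prod.Lex.lt_iff]

theorem pvKey6_inj {a b : pvItem} (h : pvKey6 a = pvKey6 b) : a = b := by
  rw [pvKey6, pvKey6] at h
  obtain ⟨h1, h2, h3, h4, h5⟩ : a.1 = b.1 ∧ a.2.1 = b.2.1 ∧ a.2.2.1 = b.2.2.1 ∧
      a.2.2.2.1 = b.2.2.2.1 ∧ a.2.2.2.2 = b.2.2.2.2 := by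
    simpa [Prod.ext_iff] using h
  exact Prod.ext h1 (Prod.ext h2 (Prod.ext h3 (Prod.ext h4 h5)))

theorem pvKey6_lt_k2_le {a b : pvItem} (h : pvKey6 a < pvKey6 b) : pvK2 a ≤ pvK2 b := by
  rw [pvKey6_lt_iff] at h
  rw [pvK2_le_iff]
  rcases h with h | ⟨h1, h⟩
  · exact Or.inl h
  rcases h with h | ⟨h2, h⟩
  · exact Or.inr ⟨h1, le_of_lt h⟩
  · exact Or.inr ⟨h1, le_of_eq h2⟩

theorem pv_k2_idx_key6_lt {a b : pvItem} (hk : pvK2 a = pvK2 b) (hi : pvIdx a < pvIdx b) :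
    pvKey6 a < pvKey6 b := by
  obtain ⟨h1, h2⟩ := pvK2_eq_iff.1 hk
  rw [pvIdx_lt_iff] at hi
  rw [pvKey6_lt_iff]
  rcases hi with h | ⟨h3, h4⟩
  · exact Or.inr ⟨h1, Or.inr ⟨h2, Or.inl h⟩⟩
  · exact Or.inr ⟨h1, Or.inr ⟨h2, Or.inr ⟨h3, Or.inl h4⟩⟩⟩

-- ---------- assembly ----------

abbrev pvS (sr : List (String × List String)) (ys ye : Int) : List pvItem :=
  PySem.List.sorted (pvF sr ys ye) pvKey6

theorem pvF_nodup (sr : List (String × List String)) (ys ye : Int) : (pvF sr ys ye).Nodup :=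
  (pvF_idx sr ys ye).imp (fun {a b} hab => by rintro rfl; exact absurd hab (lt_irrefl _))

theorem pvS_pw6 (sr : List (String × List String)) (ys ye : Int) :
    (pvS sr ys ye).Pairwise (fun a b => pvKey6 a < pvKey6 b) := by
  have hle := PySem.List.sorted_pairwise (pvF sr ys ye) pvKey6
  have hnd : (pvS sr ys ye).Nodup :=
    ((PySem.List.sorted_perm (pvF sr ys ye) pvKey6 false).nodup_iff).2 (pvF_nodup sr ys ye)
  refine (hle.and hnd).imp ?_
  rintro a b ⟨h1, h2⟩
  exact lt_of_le_of_ne h1 (fun he => h2 (pvKey6_inj he))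

theorem pvS_pw2 (sr : List (String × List String)) (ys ye : Int) :
    (pvS sr ys ye).Pairwise (fun a b => pvK2 a ≤ pvK2 b) :=
  (pvS_pw6 sr ys ye).imp (fun h => pvKey6_lt_k2_le h)

-- the (year, date8) class lists of sorted flat and of flat are EQUAL
theorem pvFB (sr : List (String × List String)) (ys ye : Int) (k : pvK2T) :
    (pvS sr ys ye).filter (fun z => decide (pvK2 z = k))
      = (pvF sr ys ye).filter (fun z => decide (pvK2 z = k)) := by
  have hSpw : ((pvS sr ys ye).filter (fun z => decide (pvK2 z = k))).Pairwise
      (fun a b => pvKey6 a < pvKey6 b) := (pvS_pw6 sr ys ye).filter _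
  have hFpw : ((pvF sr ys ye).filter (fun z => decide (pvK2 z = k))).Pairwise
      (fun a b => pvKey6 a < pvKey6 b) := by
    have hidx : ((pvF sr ys ye).filter (fun z => decide (pvK2 z = k))).Pairwise
        (fun a b => pvIdx a < pvIdx b) := (pvF_idx sr ys ye).filter _
    refine hidx.imp_of_mem ?_
    intro a b ha hb hab
    have hka : pvK2 a = k := by simpa using (List.mem_filter.1 ha).2
    have hkb : pvK2 b = k := by simpa using (List.mem_filter.1 hb).2
    exact pv_k2_idx_key6_lt (hka.trans hkb.symm) hab
  have hperm : ((pvF sr ys ye).filter (fun z => decide (pvK2 z = k))).Perm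
      ((pvS sr ys ye).filter (fun z => decide (pvK2 z = k))) :=
    ((PySem.List.sorted_perm (pvF sr ys ye) pvKey6 false).filter _).symm
  have h1 := PySem.List.sorted_eq_of_perm_of_pairwise_lt
    ((pvS sr ys ye).filter (fun z => decide (pvK2 z = k)))
    ((pvS sr ys ye).filter (fun z => decide (pvK2 z = k))) pvKey6 (List.Perm.refl _) hSpw
  have h2 := PySem.List.sorted_eq_of_perm_of_pairwise_lt
    ((pvS sr ys ye).filter (fun z => decide (pvK2 z = k)))
    ((pvF sr ys ye).filter (fun z => decide (pvK2 z = k))) pvKey6 hperm hFpw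
  rw [← h1, h2]

theorem pv_k2_val (sr : List (String × List String)) (ys ye : Int) :
    ∀ r ∈ pvF sr ys ye, pvK2 r = pvKOf (pvVal r) := by
  intro r hr
  obtain ⟨h1, h2⟩ := pvF_fields sr ys ye r hr
  rw [pvK2, pvKOf, h1, h2]

theorem pvQfilter (sr : List (String × List String)) (ys ye : Int) (k : pvK2T) :
    ((pvF sr ys ye).filter (fun z => decide (pvK2 z = k))).map pvVal
      = (pvQ sr ys ye).filter (fun p => decide (pvKOf p = k)) := by
  rw [← pvF_map_val sr ys ye, List.filter_map]
  congr 1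
  apply List.filter_congr
  intro r hr
  simp only [Function.comp_apply]
  rw [pv_k2_val sr ys ye r hr]

theorem pvA_keys (Q : List pvPair) :
    (Q.foldl pvStepA PySem.Dict.empty).keys = pvYears Q := by
  rw [PySem.Dict.keys, pvA_items, List.map_map]
  show List.map id (pvYears Q) = pvYears Q
  exact List.map_id _

theorem pvYears_nodup (Q : List pvPair) : (pvYears Q).Nodup :=
  PySem.Set.nodup_ofList _

theorem pvA_get (Q : List pvPair) (yy : Int) (hy : yy ∈ pvYears Q) :
    (Q.foldl pvStepA PySem.Dict.empty).get? yy = some (pvInner Q yy) := by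
  rw [PySem.Dict.get?_eq_some_iff_mem_items _ _ _ (by
    rw [pvA_keys]; exact pvYears_nodup Q), pvA_items]
  exact List.mem_map_of_mem hy

theorem pvYears_mem (Q : List pvPair) (yy : Int) :
    yy ∈ pvYears Q ↔ ∃ p ∈ Q, pvYOf p = yy := by
  rw [show pvYears Q = PySem.List.dedup (List.map pvYOf Q) from rfl,
    PySem.List.mem_dedup, List.mem_map]

-- winners of the sorted flat list = first flat occurrence of each (year, date8) class
theorem pvW2_mem (sr : List (String × List String)) (ys ye : Int) (r : pvItem) :
    r ∈ pvAdj none (pvS sr ys ye) ↔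
      ((pvF sr ys ye).filter (fun z => decide (pvK2 z = pvK2 r))).head? = some r := by
  rw [pv_adj_eq_keep _ (pvS_pw2 sr ys ye), pv_keep_head_filter, pvFB]

-- the values of the inner dict for a year = that year's winners
theorem pvInner_values (Q : List pvPair) (yy : Int) :
    (pvInner Q yy).values = pvAList Q yy := by
  rw [pvInner, PySem.Dict.values]
  show List.map Prod.snd (List.map (fun p => (pvDOf p, p)) (pvAList Q yy)) = _
  rw [List.map_map]
  show List.map id (pvAList Q yy) = pvAList Q yy
  exact List.map_id _

theorem pvR_eq (W2 : List pvItem) :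
    W2.foldl (fun d r => d.modify r.1 [] (fun l => l ++ [pvVal r])) PySem.Dict.empty
      = (W2.map (fun r => (r.1, pvVal r))).foldl
          (fun d p => d.modify p.1 [] (fun l => l ++ [p.2])) PySem.Dict.empty := by
  rw [List.foldl_map]

theorem pvR_keys (W2 : List pvItem) :
    (W2.foldl (fun d r => d.modify r.1 [] (fun l => l ++ [pvVal r]))
        (PySem.Dict.empty : PySem.Dict Int (List pvPair))).keys
      = PySem.Set.ofList (W2.map (fun r => r.1)) := by
  rw [PySem.Dict.keys_foldl_modify_key W2 (fun r => r.1) []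
    (fun _ r => fun l => l ++ [pvVal r]) PySem.Dict.empty]
  rw [PySem.Dict.keys_empty]
  rfl

theorem pvR_keys_nodup (W2 : List pvItem) :
    (W2.foldl (fun d r => d.modify r.1 [] (fun l => l ++ [pvVal r]))
        (PySem.Dict.empty : PySem.Dict Int (List pvPair))).keys.Nodup :=
  PySem.Dict.nodup_keys_foldl_modify_key W2 (fun r => r.1) []
    (fun _ r => fun l => l ++ [pvVal r]) PySem.Dict.empty (by
      rw [PySem.Dict.keys_empty]; exact List.nodup_nil)

theorem pvR_getD (W2 : List pvItem) (c : Int) :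
    (W2.foldl (fun d r => d.modify r.1 [] (fun l => l ++ [pvVal r]))
        (PySem.Dict.empty : PySem.Dict Int (List pvPair))).getD c []
      = (W2.filter (fun r => r.1 == c)).map pvVal := by
  rw [pvR_eq, PySem.Dict.getD_foldl_modify_append, PySem.Dict.getD_empty, List.nil_append]
  rw [show (List.filter (fun p => p.1 == c) (W2.map (fun r => (r.1, pvVal r))))
      = (W2.filter (fun r => r.1 == c)).map (fun r => (r.1, pvVal r)) from List.filter_map]
  rw [List.map_map]
  rfl

-- a year occurs among the winners iff it occurs in the in-range stream
theorem pvW2_year_mem (sr : List (String × List String)) (ys ye : Int) (y : Int) :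
    (∃ r ∈ pvAdj none (pvS sr ys ye), r.1 = y) ↔ y ∈ pvYears (pvQ sr ys ye) := by
  rw [pv_adj_eq_keep _ (pvS_pw2 sr ys ye), pvYears_mem]
  constructor
  · rintro ⟨r, hr, rfl⟩
    have hrS := pv_keep_subset _ _ _ hr
    have hrF : r ∈ pvF sr ys ye := (PySem.List.mem_sorted _ _ _ _).1 hrS
    refine ⟨pvVal r, ?_, ((pvF_fields sr ys ye r hrF).1).symm⟩
    rw [← pvF_map_val sr ys ye]
    exact List.mem_map_of_mem hrF
  · rintro ⟨p, hp, rfl⟩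
    rw [← pvF_map_val sr ys ye] at hp
    obtain ⟨r, hrF, rfl⟩ := List.mem_map.1 hp
    have hrS : r ∈ pvS sr ys ye := (PySem.List.mem_sorted _ _ _ _).2 hrF
    obtain ⟨w, hw, hk⟩ := (pv_keep_exists_key pvK2 (pvS sr ys ye) (pvK2 r)).2 ⟨r, hrS, rfl⟩
    refine ⟨w, hw, ?_⟩
    rw [(pvK2_eq_iff.1 hk).1, (pvF_fields sr ys ye r hrF).1]

theorem pv_years_eq (sr : List (String × List String)) (ys ye : Int) :
    PySem.List.sorted (pvYears (pvQ sr ys ye)) (fun y => y)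
      = PySem.Set.ofList ((pvAdj none (pvS sr ys ye)).map (fun r => r.1)) := by
  apply PySem.List.sorted_eq_of_perm_of_pairwise_lt
  · rw [List.perm_ext_iff_of_nodup (PySem.Set.nodup_ofList _) (pvYears_nodup _)]
    intro y
    rw [PySem.Set.mem_ofList, List.mem_map]
    rw [show (∃ r ∈ pvAdj none (pvS sr ys ye), r.1 = y) ↔ y ∈ pvYears (pvQ sr ys ye) from
      pvW2_year_mem sr ys ye y]
  · have hpw : ((pvAdj none (pvS sr ys ye)).map (fun r => r.1)).Pairwise
        (fun a b => a ≤ b) := by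
      rw [List.pairwise_map]
      exact (pv_adj_pairwise _ (pvS_pw2 sr ys ye)).imp (fun h => by
        rcases pvK2_lt_iff.1 h with h1 | ⟨h1, _⟩
        · exact le_of_lt h1
        · exact le_of_eq h1)
    have hsub := pv_ofList_sublist ((pvAdj none (pvS sr ys ye)).map (fun r => r.1))
    have hle := hpw.sublist hsub
    have hnd := PySem.Set.nodup_ofList ((pvAdj none (pvS sr ys ye)).map (fun r => r.1))
    refine (hle.and hnd).imp ?_
    rintro a b ⟨h1, h2⟩
    exact lt_of_le_of_ne h1 h2

-- per-year: A's chronologically sorted dedup list = B's winners of that year, in order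
theorem pv_values_eq (sr : List (String × List String)) (ys ye : Int) (yy : Int) :
    PySem.List.sorted (pvAList (pvQ sr ys ye) yy) (fun p => p.1)
      = ((pvAdj none (pvS sr ys ye)).filter (fun r => r.1 == yy)).map pvVal := by
  have hW2F : ∀ r ∈ pvAdj none (pvS sr ys ye), r ∈ pvF sr ys ye := by
    intro r hr
    rw [pv_adj_eq_keep _ (pvS_pw2 sr ys ye)] at hr
    exact (PySem.List.mem_sorted _ _ _ _).1 (pv_keep_subset _ _ _ hr)
  have hpwB : (((pvAdj none (pvS sr ys ye)).filter (fun r => r.1 == yy)).map pvVal).Pairwise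
      (fun a b => a.1 < b.1) := by
    rw [List.pairwise_map]
    have h0 : ((pvAdj none (pvS sr ys ye)).filter (fun r => r.1 == yy)).Pairwise
        (fun a b => pvK2 a < pvK2 b) := (pv_adj_pairwise _ (pvS_pw2 sr ys ye)).filter _
    refine h0.imp_of_mem ?_
    intro a b ha hb hab
    have haF := hW2F a (List.mem_filter.1 ha).1
    have hbF := hW2F b (List.mem_filter.1 hb).1
    have hay : a.1 = yy := by simpa using (List.mem_filter.1 ha).2
    have hby : b.1 = yy := by simpa using (List.mem_filter.1 hb).2
    have hd : a.2.1 < b.2.1 := by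
      rcases pvK2_lt_iff.1 hab with h1 | ⟨_, h2⟩
      · rw [hay, hby] at h1; exact absurd h1 (lt_irrefl _)
      · exact h2
    rw [(pvF_fields sr ys ye a haF).2, (pvF_fields sr ys ye b hbF).2] at hd
    exact pv_dOf_lt hd
  apply PySem.List.sorted_eq_of_perm_of_pairwise_lt
  · rw [show pvAList (pvQ sr ys ye) yy
        = (pvKeep pvKOf (pvQ sr ys ye)).filter (fun p => decide (pvYOf p = yy)) from rfl]
    rw [List.perm_ext_iff_of_nodup
      (hpwB.imp (fun {a b} h => by rintro rfl; exact absurd h (lt_irrefl _)))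
      (((pv_keep_pairwise_ne pvKOf (pvQ sr ys ye)).filter _).imp
        (fun {a b} h => by rintro rfl; exact h rfl))]
    intro p
    constructor
    -- B → A
    · intro hp
      obtain ⟨r, hrf, rfl⟩ := List.mem_map.1 hp
      obtain ⟨hrW2, hry⟩ := List.mem_filter.1 hrf
      have hry' : r.1 = yy := by simpa using hry
      have hrF : r ∈ pvF sr ys ye := hW2F r hrW2
      have hhead := (pvW2_mem sr ys ye r).1 hrW2
      have hmap : (((pvF sr ys ye).filter (fun z => decide (pvK2 z = pvK2 r))).map pvVal).head?
          = some (pvVal r) := by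
        rw [List.head?_map, hhead]
        rfl
      rw [pvQfilter sr ys ye (pvK2 r)] at hmap
      rw [show pvK2 r = pvKOf (pvVal r) from pv_k2_val sr ys ye r hrF] at hmap
      rw [List.mem_filter]
      refine ⟨(pv_keep_head_filter pvKOf (pvQ sr ys ye) (pvVal r)).2 hmap, ?_⟩
      rw [← (pvF_fields sr ys ye r hrF).1, hry']
      simp
    -- A → B
    · intro hp
      obtain ⟨hpW, hpy⟩ := List.mem_filter.1 hp
      have hpy' : pvYOf p = yy := by simpa using hpy
      have hhead := (pv_keep_head_filter pvKOf (pvQ sr ys ye) p).1 hpW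
      rw [← pvQfilter sr ys ye (pvKOf p), List.head?_map] at hhead
      obtain ⟨r0, hr0h, hr0v⟩ := Option.map_eq_some_iff.1 hhead
      have hr0mem : r0 ∈ (pvF sr ys ye).filter (fun z => decide (pvK2 z = pvKOf p)) :=
        List.mem_of_mem_head? hr0h
      obtain ⟨hr0F, hr0k⟩ := List.mem_filter.1 hr0mem
      have hr0k' : pvK2 r0 = pvKOf p := by simpa using hr0k
      have hr0W2 : r0 ∈ pvAdj none (pvS sr ys ye) := by
        rw [pvW2_mem sr ys ye r0, hr0k']
        exact hr0h
      refine List.mem_map.2 ⟨r0, List.mem_filter.2 ⟨hr0W2, ?_⟩, hr0v⟩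
      have h2 : (r0.1, r0.2.1) = (pvYOf p, pvDOf p) := by
        rw [pvK2, pvKOf] at hr0k'
        simpa using hr0k'
      rw [Prod.mk.injEq] at h2
      rw [h2.1, hpy']
      simp
  · exact hpwB

theorem pvA_shape (sr : List (String × List String)) (ys ye L : Int) :
    merge_timestamps_by_year sr ys ye L
      = (PySem.List.sorted (pvYears (pvQ sr ys ye)) (fun y => y)).map
          (fun y => (y, PySem.List.sorted
            ((((pvQ sr ys ye).foldl pvStepA PySem.Dict.empty).get? y).getD PySem.Dict.empty).values
            (fun p => p.1))) := by
  show (PySem.List.sorted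
      (sr.foldl (fun d p => p.2.foldl (pvA_add ys ye p.1) d) PySem.Dict.empty).keys
      (fun y => y)).foldl
    (fun res y => res ++ [(y, PySem.List.sorted
      (((sr.foldl (fun d p => p.2.foldl (pvA_add ys ye p.1) d) PySem.Dict.empty).get? y).getD
        PySem.Dict.empty).values (fun p => p.1))]) [] = _
  rw [pvA_loop_eq sr ys ye, pvA_keys]
  rw [PySem.List.foldl_append_singleton_eq_map
    (fun y => (y, PySem.List.sorted
      ((((pvQ sr ys ye).foldl pvStepA PySem.Dict.empty).get? y).getD PySem.Dict.empty).values
      (fun p => p.1)))]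
  rw [List.nil_append]

theorem pvB_shape (sr : List (String × List String)) (ys ye L : Int) :
    merge_timestamps_by_year_alt sr ys ye L
      = ((pvAdj none (pvS sr ys ye)).foldl
          (fun d r => d.modify r.1 [] (fun l => l ++ [pvVal r])) PySem.Dict.empty).items := by
  show (((PySem.List.sorted
      ((PySem.List.enumerate sr).foldl (fun acc p =>
        (PySem.List.enumerate p.2.2).foldl (fun acc q =>
          let y := if 4 ≤ PySem.Str.len q.2 then (PySem.Int.ofStr? (PySem.Str.slice q.2 none (some 4))).getD 0 else 0
          if ys ≤ y ∧ y ≤ ye then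
            acc ++ [(y, PySem.Str.slice q.2 none (some 8), p.1, q.1, q.2, p.2.1)]
          else acc) acc) []) pvKey6).foldl pvB_gstep (none, PySem.Dict.empty)).2).items = _
  rw [pvB_flat_eq sr ys ye [], List.nil_append]
  rw [pvB_group_eq]

theorem pv_main (sr : List (String × List String)) (ys ye L : Int) :
    merge_timestamps_by_year sr ys ye L = merge_timestamps_by_year_alt sr ys ye L := by
  rw [pvA_shape sr ys ye L, pvB_shape sr ys ye L]
  rw [PySem.Dict.items_eq_map_keys _ (pvR_keys_nodup (pvAdj none (pvS sr ys ye))) []]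
  rw [pvR_keys]
  rw [← pv_years_eq sr ys ye]
  apply List.map_congr_left
  intro yy hyy
  have hyY : yy ∈ pvYears (pvQ sr ys ye) :=
    (PySem.List.mem_sorted _ _ _ _).1 hyy
  rw [pvA_get (pvQ sr ys ye) yy hyY]
  rw [show (some (pvInner (pvQ sr ys ye) yy)).getD PySem.Dict.empty
      = pvInner (pvQ sr ys ye) yy from rfl]
  rw [pvInner_values, pv_values_eq sr ys ye yy, pvR_getD]

theorem pv_witness_ok :
    Dom_merge_timestamps_by_year (pvWitness_merge_timestamps_by_year.1) (pvWitness_merge_timestamps_by_year.2.1) (pvWitness_merge_timestamps_by_year.2.2.1) (pvWitness_merge_timestamps_by_year.2.2.2) ∧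
    Pre_merge_timestamps_by_year (pvWitness_merge_timestamps_by_year.1) (pvWitness_merge_timestamps_by_year.2.1) (pvWitness_merge_timestamps_by_year.2.2.1) (pvWitness_merge_timestamps_by_year.2.2.2) := by
  decide

-- ===== VERDICT (by name: the statement is the Claim_ definition above) =====
theorem merge_timestamps_by_year_spec : Claim_equal_merge_timestamps_by_year := by
  intro seed_results year_start year_end L _ _
  unfold Spec_merge_timestamps_by_year
  exact pv_main seed_results year_start year_end L
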